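-- pv_equiv track=rewrite | github.com/khaneliman/khanelinix | modules/darwin/system/networking/local-network-privileges-cleanup.py | prune_uuid_cache
-- ===== SOURCE A (Python) =====
-- def prune_uuid_cache(uuid_cache_plist, removed_identifiers, surviving_identifiers):
--     updated = dict(uuid_cache_plist)
--
--     for key in ("uuid-mappings", "synthesized-uuid-mappings"):
--         mappings = dict(updated.get(key, {}))
--         for identifier in removed_identifiers:
--             if identifier in surviving_identifiers:
--                 continue
--             mappings.pop(identifier, None)
--         updated[key] = mappings
--
--     return updated
-- ===== SOURCE B (Python) =====
-- def prune_uuid_cache(uuid_cache_plist, removed_identifiers, surviving_identifiers):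
--     survivors = set(surviving_identifiers)
--     to_remove = {i for i in removed_identifiers if i not in survivors}
--     pruned = {}
--     for key, value in dict(uuid_cache_plist).items():
--         if key in ("uuid-mappings", "synthesized-uuid-mappings"):
--             pruned[key] = {k: v for k, v in dict(value).items() if k not in to_remove}
--         else:
--             pruned[key] = value
--     for key in ("uuid-mappings", "synthesized-uuid-mappings"):
--         pruned.setdefault(key, {})
--     return pruned
-- ===== Notes on version B (the rewrite author's own statement) =====
-- stated objective: faster
-- what changed: A walks the removal list for each of the two keys, scanning the survivor list per removal and popping from a copied sub-mapping; B instead precomputes the effective removals once as a set and rebuilds the whole result in a single pass over the cache's own entries with a filtering dict comprehension, finishing with setdefault for absent keys.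
import Mathlib
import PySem

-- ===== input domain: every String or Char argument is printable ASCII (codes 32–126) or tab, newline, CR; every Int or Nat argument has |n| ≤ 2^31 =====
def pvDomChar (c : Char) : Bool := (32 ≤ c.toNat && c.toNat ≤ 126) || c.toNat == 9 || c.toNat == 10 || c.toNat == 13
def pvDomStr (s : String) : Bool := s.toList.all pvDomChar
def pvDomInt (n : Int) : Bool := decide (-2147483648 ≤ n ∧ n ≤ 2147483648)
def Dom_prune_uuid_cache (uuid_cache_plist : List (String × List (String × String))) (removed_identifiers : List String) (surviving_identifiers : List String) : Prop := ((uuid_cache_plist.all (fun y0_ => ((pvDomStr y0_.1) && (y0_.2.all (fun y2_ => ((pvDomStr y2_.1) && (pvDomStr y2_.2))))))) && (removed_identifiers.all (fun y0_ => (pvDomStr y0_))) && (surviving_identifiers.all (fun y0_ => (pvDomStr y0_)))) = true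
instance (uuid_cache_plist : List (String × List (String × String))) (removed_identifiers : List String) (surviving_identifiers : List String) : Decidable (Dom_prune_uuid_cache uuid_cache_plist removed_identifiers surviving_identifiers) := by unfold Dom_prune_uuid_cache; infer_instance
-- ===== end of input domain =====

-- B replaces A's per-removal pop loop over the removal list by one pass over the cache's own
-- items with a precomputed removal set (objective: faster; asymptotically fewer membership scans).

-- ===== PORT A =====
-- the inner 'for identifier in removed_identifiers' loop of A
def pvEraseLoop (removed_identifiers surviving_identifiers : List String)
    (mappings : PySem.Dict String String) : PySem.Dict String String :=
  removed_identifiers.foldl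
    (fun m identifier =>
      if surviving_identifiers.contains identifier then m else m.erase identifier) mappings

def prune_uuid_cache (uuid_cache_plist : List (String × List (String × String))) (removed_identifiers : List String) (surviving_identifiers : List String) : List (String × List (String × String)) :=
  (["uuid-mappings", "synthesized-uuid-mappings"].foldl
    (fun updated key =>
      updated.insert key
        (pvEraseLoop removed_identifiers surviving_identifiers
          (PySem.Dict.ofList (updated.getD key []))).items)
    (PySem.Dict.ofList uuid_cache_plist)).items

-- ===== PORT B =====
-- to_remove = {i for i in removed_identifiers if i not in survivors}
def pvToRemove (removed_identifiers surviving_identifiers : List String) : PySem.Set String :=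
  let survivors := PySem.Set.ofList surviving_identifiers
  removed_identifiers.foldl
    (fun s i => if survivors.contains i then s else PySem.Set.add s i) PySem.Set.empty

-- {k: v for k, v in dict(value).items() if k not in to_remove}
def pvFilterVal (to_remove : PySem.Set String) (value : List (String × String)) :
    List (String × String) :=
  ((PySem.Dict.ofList value).items.foldl
    (fun d kv => if to_remove.contains kv.1 then d else d.insert kv.1 kv.2)
    PySem.Dict.empty).items

-- the main 'for key, value in dict(uuid_cache_plist).items()' loop of B
def pvBuildLoop (to_remove : PySem.Set String)
    (items : List (String × List (String × String))) :
    PySem.Dict String (List (String × String)) :=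
  items.foldl
    (fun pruned p =>
      pruned.insert p.1
        (if p.1 == "uuid-mappings" || p.1 == "synthesized-uuid-mappings"
         then pvFilterVal to_remove p.2 else p.2))
    PySem.Dict.empty

def prune_uuid_cache_alt (uuid_cache_plist : List (String × List (String × String))) (removed_identifiers : List String) (surviving_identifiers : List String) : List (String × List (String × String)) :=
  let to_remove := pvToRemove removed_identifiers surviving_identifiers
  (((pvBuildLoop to_remove (PySem.Dict.ofList uuid_cache_plist).items).setdefault
      "uuid-mappings" []).setdefault "synthesized-uuid-mappings" []).items

-- ===== PRECONDITION & SPEC =====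
def Spec_prune_uuid_cache (uuid_cache_plist : List (String × List (String × String))) (removed_identifiers : List String) (surviving_identifiers : List String) (out : List (String × List (String × String))) : Prop := out = prune_uuid_cache_alt uuid_cache_plist removed_identifiers surviving_identifiers
instance (uuid_cache_plist : List (String × List (String × String))) (removed_identifiers : List String) (surviving_identifiers : List String) (out : List (String × List (String × String))) : Decidable (Spec_prune_uuid_cache uuid_cache_plist removed_identifiers surviving_identifiers out) := by unfold Spec_prune_uuid_cache; infer_instance

-- ===== CLAIM (what is proved, stated in full; the proofs are below) =====
def Claim_equal_prune_uuid_cache : Prop := ∀ (uuid_cache_plist : List (String × List (String × String))) (removed_identifiers : List String) (surviving_identifiers : List String), Dom_prune_uuid_cache uuid_cache_plist removed_identifiers surviving_identifiers → Spec_prune_uuid_cache uuid_cache_plist removed_identifiers surviving_identifiers (prune_uuid_cache uuid_cache_plist removed_identifiers surviving_identifiers)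

-- ===== LEMMAS AND PROOFS =====

-- A's erase loop is the filter keeping pairs whose key is not an effective removal.
theorem eraseLoop_items (l surv : List String) (d : PySem.Dict String String) :
    (pvEraseLoop l surv d).items
      = d.items.filter (fun p => !l.contains p.1 || surv.contains p.1) := by
  induction l generalizing d with
  | nil => simp [pvEraseLoop]
  | cons i t ih =>
    simp only [pvEraseLoop, List.foldl_cons] at *
    by_cases h : surv.contains i = true
    · rw [if_pos h, ih]
      apply List.filter_congr
      intro p _
      have hs : i ∈ surv := by simpa [List.contains_iff_mem] using h
      by_cases hpi : p.1 = i
      · simp [hpi, hs]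
      · simp [hpi]
    · rw [if_neg h, ih]
      simp only [PySem.Dict.erase, List.filter_filter]
      apply List.filter_congr
      intro p _
      have hs : i ∉ surv := by simpa [List.contains_iff_mem] using h
      by_cases hpi : p.1 = i
      · simp [hpi, hs]
      · simp only [List.contains_cons]
        have : (p.1 == i) = false := by simpa using hpi
        simp [this, Bool.and_comm]

-- membership in B's precomputed removal set
theorem toRemove_mem (l surv : List String) (s : PySem.Set String) (x : String) :
    (x ∈ l.foldl
        (fun s i => if (PySem.Set.ofList surv).contains i then s else PySem.Set.add s i) s)
      ↔ (x ∈ s ∨ (x ∈ l ∧ x ∉ surv)) := by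
  induction l generalizing s with
  | nil => simp
  | cons i t ih =>
    simp only [List.foldl_cons]
    by_cases h : i ∈ surv
    · rw [if_pos (by simp [PySem.Set.contains, PySem.Set.mem_ofList, h]), ih]
      constructor
      · rintro (hs | ht); · exact Or.inl hs
        · exact Or.inr ⟨List.mem_cons_of_mem _ ht.1, ht.2⟩
      · rintro (hs | ⟨hm, hns⟩); · exact Or.inl hs
        · rcases List.mem_cons.mp hm with rfl | hm'
          · exact absurd h hns
          · exact Or.inr ⟨hm', hns⟩
    · rw [if_neg (by simp [PySem.Set.contains, PySem.Set.mem_ofList, h]), ih]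
      simp only [PySem.Set.mem_add]
      constructor
      · rintro ((hs | rfl) | ht)
        · exact Or.inl hs
        · exact Or.inr ⟨List.mem_cons_self, h⟩
        · exact Or.inr ⟨List.mem_cons_of_mem _ ht.1, ht.2⟩
      · rintro (hs | ⟨hm, hns⟩); · exact Or.inl (Or.inl hs)
        · rcases List.mem_cons.mp hm with rfl | hm'
          · exact Or.inl (Or.inr rfl)
          · exact Or.inr ⟨hm', hns⟩

theorem toRemove_contains (l surv : List String) (x : String) :
    (pvToRemove l surv).contains x = (l.contains x && !surv.contains x) := by
  have h := toRemove_mem l surv PySem.Set.empty x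
  rw [Bool.eq_iff_iff]
  simp [pvToRemove, PySem.Set.contains, PySem.Set.empty] at h ⊢
  rw [h]

-- B's comprehension over a nodup-key item list is the corresponding filter.
theorem rebuild_items_aux (tr : PySem.Set String) (ps : List (String × String))
    (d : PySem.Dict String String)
    (hfresh : ∀ p ∈ ps, d.contains p.1 = false)
    (hnd : (ps.map Prod.fst).Nodup) :
    (ps.foldl (fun d kv => if tr.contains kv.1 then d else d.insert kv.1 kv.2) d).items
      = d.items ++ ps.filter (fun kv => !tr.contains kv.1) := by
  induction ps generalizing d with
  | nil => simp
  | cons kv t ih =>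
    simp only [List.map_cons, List.nodup_cons] at hnd
    simp only [List.foldl_cons]
    by_cases h : tr.contains kv.1 = true
    · rw [if_pos h, ih d (fun p hp => hfresh p (List.mem_cons_of_mem _ hp)) hnd.2]
      have hm : kv.1 ∈ tr := by simpa [PySem.Set.contains, List.contains_iff_mem] using h
      simp [hm]
    · rw [if_neg h]
      rw [ih (d.insert kv.1 kv.2) ?_ hnd.2]
      · rw [PySem.Dict.items_insert_of_not_contains d kv.2 (hfresh kv List.mem_cons_self)]
        have hm : kv.1 ∉ tr := by simpa [PySem.Set.contains, List.contains_iff_mem] using h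
        simp [hm]
      · intro p hp
        rw [PySem.Dict.contains_insert]
        have hne : p.1 ≠ kv.1 := by
          intro he
          exact hnd.1 (he ▸ List.mem_map_of_mem hp)
        simp [hne, hfresh p (List.mem_cons_of_mem _ hp)]

-- per-value equality: A's erased sub-mapping equals B's filtered rebuild of the same value
theorem val_eq (rem surv : List String) (v : List (String × String)) :
    (pvEraseLoop rem surv (PySem.Dict.ofList v)).items
      = pvFilterVal (pvToRemove rem surv) v := by
  rw [eraseLoop_items]
  rw [pvFilterVal, rebuild_items_aux _ _ _ (by simp) ?nd]
  case nd =>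
    have h := PySem.Dict.nodup_keys_ofList (κ := String) (ν := String) v
    simpa [PySem.Dict.keys] using h
  apply List.filter_congr
  intro p _
  rw [toRemove_contains]
  cases rem.contains p.1 <;> cases surv.contains p.1 <;> rfl


-- B's main loop over the nodup-key items of dict(uuid_cache_plist) maps each entry pointwise.
theorem buildLoop_items (tr : PySem.Set String)
    (D : PySem.Dict String (List (String × String))) (hnd : D.keys.Nodup) :
    (pvBuildLoop tr D.items).items
      = D.items.map (fun p =>
          (p.1, if p.1 == "uuid-mappings" || p.1 == "synthesized-uuid-mappings"
                then pvFilterVal tr p.2 else p.2)) := by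
  have h := PySem.Dict.items_foldl_insert_fresh (l := D.items) (d := PySem.Dict.empty)
    (k := Prod.fst)
    (v := fun p => if p.1 == "uuid-mappings" || p.1 == "synthesized-uuid-mappings"
                   then pvFilterVal tr p.2 else p.2)
    (by simp) (by simpa [PySem.Dict.keys] using hnd)
  simpa [pvBuildLoop] using h

theorem buildLoop_contains (tr : PySem.Set String)
    (D : PySem.Dict String (List (String × String))) (hnd : D.keys.Nodup) (x : String) :
    (pvBuildLoop tr D.items).contains x = D.contains x := by
  rw [PySem.Dict.contains_eq_decide_mem_keys, PySem.Dict.contains_eq_decide_mem_keys]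
  have : (pvBuildLoop tr D.items).keys = D.keys := by
    simp only [PySem.Dict.keys, buildLoop_items tr D hnd, List.map_map]
    rfl
  rw [this]

-- ===== VERDICT (by name: the statement is the Claim_ definition above) =====
theorem prune_uuid_cache_spec : Claim_equal_prune_uuid_cache := by
  intro plist rem surv _
  unfold Spec_prune_uuid_cache prune_uuid_cache prune_uuid_cache_alt
  simp only [List.foldl_cons, List.foldl_nil]
  set tr := pvToRemove rem surv with htr
  set D := PySem.Dict.ofList plist with hD
  have hnd : D.keys.Nodup := PySem.Dict.nodup_keys_ofList plist
  have hbeq : ("synthesized-uuid-mappings" == "uuid-mappings") = false := by decide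
  have hbeq' : ("uuid-mappings" == "synthesized-uuid-mappings") = false := by decide
  have hFnil : pvFilterVal tr [] = [] := rfl
  have hB := buildLoop_items tr D hnd
  have hBc := buildLoop_contains tr D hnd
  have hne : "synthesized-uuid-mappings" ≠ "uuid-mappings" := by decide
  rw [show ∀ a, (pvEraseLoop rem surv (PySem.Dict.ofList ((D.insert "uuid-mappings" a).getD "synthesized-uuid-mappings" []))).items
        = pvFilterVal tr (D.getD "synthesized-uuid-mappings" []) from fun a => by
      rw [PySem.Dict.getD_insert_of_ne D a [] hne, val_eq, htr]]
  rw [show (pvEraseLoop rem surv (PySem.Dict.ofList (D.getD "uuid-mappings" []))).items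
        = pvFilterVal tr (D.getD "uuid-mappings" []) from by rw [val_eq, htr]]
  -- A's per-member replacement functions and B's pointwise map agree on D's entries
  have hpoint : ∀ p ∈ D.items,
      (fun q => if q.1 == "synthesized-uuid-mappings" then ("synthesized-uuid-mappings", pvFilterVal tr (D.getD "synthesized-uuid-mappings" [])) else q)
        ((fun q => if q.1 == "uuid-mappings" then ("uuid-mappings", pvFilterVal tr (D.getD "uuid-mappings" [])) else q) p)
      = (p.1, if p.1 == "uuid-mappings" || p.1 == "synthesized-uuid-mappings" then pvFilterVal tr p.2 else p.2) := by
    intro p hp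
    by_cases h1 : p.1 = "uuid-mappings"
    · have hp' : ("uuid-mappings", p.2) ∈ D.items := by rw [← h1]; exact hp
      have hv : D.getD "uuid-mappings" [] = p.2 := PySem.Dict.getD_of_mem_items (d := D) hp' hnd []
      simp [h1, hbeq', hv]
    · by_cases h2 : p.1 = "synthesized-uuid-mappings"
      · have hp' : ("synthesized-uuid-mappings", p.2) ∈ D.items := by rw [← h2]; exact hp
        have hv : D.getD "synthesized-uuid-mappings" [] = p.2 := PySem.Dict.getD_of_mem_items (d := D) hp' hnd []
        simp [h2, hv]
      · simp [h1, h2]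

  have hnomem : ∀ (k : String), D.contains k = false → ∀ p ∈ D.items, p.1 ≠ k := by
    intro k hk p hp he
    rw [PySem.Dict.contains_eq_decide_mem_keys] at hk
    have hmem : p.1 ∈ D.keys := by
      simpa [PySem.Dict.keys] using List.mem_map_of_mem (f := Prod.fst) hp
    simp only [decide_eq_false_iff_not] at hk
    exact hk (he ▸ hmem)
  by_cases c1 : D.contains "uuid-mappings" = true
  · have e1 : (pvBuildLoop tr D.items).contains "uuid-mappings" = true := (hBc "uuid-mappings").trans c1
    rw [PySem.Dict.setdefault_of_contains _ [] e1]
    by_cases c2 : D.contains "synthesized-uuid-mappings" = true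
    · -- both keys present: pure in-place replacement on both sides
      have e2 : (pvBuildLoop tr D.items).contains "synthesized-uuid-mappings" = true := (hBc "synthesized-uuid-mappings").trans c2
      have hcI : (D.insert "uuid-mappings" (pvFilterVal tr (D.getD "uuid-mappings" []))).contains "synthesized-uuid-mappings" = true := by
        rw [PySem.Dict.contains_insert]; simp [hbeq, c2]
      rw [PySem.Dict.items_insert_of_contains _ _ hcI,
          PySem.Dict.items_insert_of_contains _ _ c1,
          PySem.Dict.setdefault_of_contains _ [] e2, hB, List.map_map]
      exact List.map_congr_left hpoint
    · -- "synthesized-uuid-mappings" absent: A appends ("synthesized-uuid-mappings", []), B's second setdefault appends ("synthesized-uuid-mappings", [])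
      have c2f : D.contains "synthesized-uuid-mappings" = false := by simpa using c2
      have e2 : (pvBuildLoop tr D.items).contains "synthesized-uuid-mappings" = false := (hBc "synthesized-uuid-mappings").trans c2f
      have hcI : (D.insert "uuid-mappings" (pvFilterVal tr (D.getD "uuid-mappings" []))).contains "synthesized-uuid-mappings" = false := by
        rw [PySem.Dict.contains_insert]; simp [hbeq, c2f]
      rw [PySem.Dict.setdefault_of_not_contains _ [] e2,
          PySem.Dict.items_insert_of_not_contains _ [] e2,
          PySem.Dict.items_insert_of_not_contains _ _ hcI,
          PySem.Dict.getD_of_not_contains D [] c2f, hFnil,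
          PySem.Dict.items_insert_of_contains _ _ c1, hB]
      refine congrArg (· ++ [("synthesized-uuid-mappings", [])]) (List.map_congr_left ?_)
      intro p hp
      have h2 : p.1 ≠ "synthesized-uuid-mappings" := hnomem "synthesized-uuid-mappings" c2f p hp
      by_cases h1 : p.1 = "uuid-mappings"
      · have hp' : ("uuid-mappings", p.2) ∈ D.items := by rw [← h1]; exact hp
        have hv : D.getD "uuid-mappings" [] = p.2 := PySem.Dict.getD_of_mem_items (d := D) hp' hnd []
        simp [h1, hv]
      · simp [h1, h2]
  · -- "uuid-mappings" absent: A appends ("uuid-mappings", []) first, B's first setdefault appends ("uuid-mappings", [])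
    have c1f : D.contains "uuid-mappings" = false := by simpa using c1
    have e1 : (pvBuildLoop tr D.items).contains "uuid-mappings" = false := (hBc "uuid-mappings").trans c1f
    have hg1 : D.getD "uuid-mappings" [] = [] := PySem.Dict.getD_of_not_contains D [] c1f
    rw [hg1, hFnil, PySem.Dict.setdefault_of_not_contains _ [] e1]
    by_cases c2 : D.contains "synthesized-uuid-mappings" = true
    · have hcI : (D.insert "uuid-mappings" ([] : List (String × String))).contains "synthesized-uuid-mappings" = true := by
        rw [PySem.Dict.contains_insert]; simp [hbeq, c2]
      have hcB : ((pvBuildLoop tr D.items).insert "uuid-mappings" []).contains "synthesized-uuid-mappings" = true := by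
        rw [PySem.Dict.contains_insert]; simp [hbeq, hBc, c2]
      rw [PySem.Dict.setdefault_of_contains _ [] hcB,
          PySem.Dict.items_insert_of_contains _ _ hcI,
          PySem.Dict.items_insert_of_not_contains _ [] c1f,
          PySem.Dict.items_insert_of_not_contains _ [] e1, hB, List.map_append]
      refine congrArg₂ (· ++ ·) (List.map_congr_left ?_) ?_
      · intro p hp
        have h1 : p.1 ≠ "uuid-mappings" := hnomem "uuid-mappings" c1f p hp
        by_cases h2 : p.1 = "synthesized-uuid-mappings"
        · have hp' : ("synthesized-uuid-mappings", p.2) ∈ D.items := by rw [← h2]; exact hp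
          have hv : D.getD "synthesized-uuid-mappings" [] = p.2 := PySem.Dict.getD_of_mem_items (d := D) hp' hnd []
          simp [h2, hv]
        · simp [h1, h2]
      · simp
    · -- both keys absent: both sides append ("uuid-mappings", []) then ("synthesized-uuid-mappings", [])
      have c2f : D.contains "synthesized-uuid-mappings" = false := by simpa using c2
      have hcI : (D.insert "uuid-mappings" ([] : List (String × String))).contains "synthesized-uuid-mappings" = false := by
        rw [PySem.Dict.contains_insert]; simp [hbeq, c2f]
      have hcB : ((pvBuildLoop tr D.items).insert "uuid-mappings" []).contains "synthesized-uuid-mappings" = false := by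
        rw [PySem.Dict.contains_insert]; simp [hbeq, hBc, c2f]
      rw [PySem.Dict.setdefault_of_not_contains _ [] hcB,
          PySem.Dict.getD_of_not_contains D [] c2f, hFnil,
          PySem.Dict.items_insert_of_not_contains _ [] hcI,
          PySem.Dict.items_insert_of_not_contains _ [] hcB,
          PySem.Dict.items_insert_of_not_contains _ [] c1f,
          PySem.Dict.items_insert_of_not_contains _ [] e1, hB]
      refine congrArg (· ++ [("uuid-mappings", [])] ++ [("synthesized-uuid-mappings", [])]) ?_
      refine ((List.map_congr_left ?_).trans (List.map_id _)).symm
      intro p hp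
      have h1 : p.1 ≠ "uuid-mappings" := hnomem "uuid-mappings" c1f p hp
      have h2 : p.1 ≠ "synthesized-uuid-mappings" := hnomem "synthesized-uuid-mappings" c2f p hp
      simp [h1, h2]
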